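-- pv_equiv track=rewrite | github.com/ansible/ansible | lib/ansible/plugins/lookup/ipa_vault.py | _format_stdout
-- ===== SOURCE A (Python) =====
-- def _format_stdout(stdout):
--     formatted_stdout = stdout.replace('-', '').replace(',', '').strip()
--     _list = []
--     temp_list = []
--     ret_list = []
--     last_line = len(formatted_stdout.split('\n'))
--     curr_line = 0
--     for line in formatted_stdout.split('\n'):
--         curr_line = curr_line + 1
--         item = line.strip()
--         if len(item) > 0 and ":" in item:
--             tmp_list = item.split(':')
--             temp_list.append([tmp_list[0], tmp_list[1].strip()])
--         if ((":" not in item and len(temp_list) > 0) or (":" in item and curr_line == last_line)):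
--             _list = {k: v for k, v in temp_list}
--             temp_list = []
--             ret_list.append([_list])
--     return ret_list
-- ===== SOURCE B (Python) =====
-- def _format_stdout(stdout):
--     # Two staged passes with a group-id index instead of A's flush-flag state
--     # machine: pass 1 numbers every line by how many non-colon lines precede it
--     # (its run id); pass 2 buckets the colon lines by run id into a dict of
--     # dicts; the bucket values, in first-appearance order, are the runs' dicts.
--     lines = [l.strip() for l in
--              stdout.replace('-', '').replace(',', '').strip().split('\n')]
--     gids = []
--     g = 0
--     for line in lines:
--         if ':' not in line:
--             g += 1
--         gids.append(g)
--     buckets = {}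
--     for gid, line in zip(gids, lines):
--         if ':' in line:
--             parts = line.split(':')
--             buckets.setdefault(gid, {})[parts[0]] = parts[1].strip()
--     return [[d] for d in buckets.values()]
-- ===== Notes on version B (the rewrite author's own statement) =====
-- stated objective: alternative
-- what changed: Replaced A's single-pass flush-flag state machine (curr_line/last_line counters, pending temp_list flushed into a dict) by a staged group-by-index pipeline: one pass numbers every line with a run id (the count of preceding non-colon lines), a second pass buckets the colon lines by run id into a dict of dicts, and the output is the bucket values in first-appearance order.
import Mathlib
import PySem

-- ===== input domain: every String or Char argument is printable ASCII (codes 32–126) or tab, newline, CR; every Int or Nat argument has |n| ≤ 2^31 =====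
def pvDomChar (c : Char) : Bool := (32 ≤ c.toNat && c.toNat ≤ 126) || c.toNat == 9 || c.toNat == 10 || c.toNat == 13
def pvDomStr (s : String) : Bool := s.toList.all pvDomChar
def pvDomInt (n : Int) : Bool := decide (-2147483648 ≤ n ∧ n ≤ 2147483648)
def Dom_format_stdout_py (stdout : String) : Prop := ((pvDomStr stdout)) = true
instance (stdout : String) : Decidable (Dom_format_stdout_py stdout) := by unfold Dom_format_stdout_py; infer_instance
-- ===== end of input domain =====

-- B replaces A's flush-flag state machine by a staged group-by-index pipeline
-- (number each line with a run id, then bucket colon lines by run id into a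
-- dict of dicts); objective: alternative decomposition, same cost.

-- ===== PORT A =====

-- s.split(':') ; sep ":" is nonempty so split? is always `some` and the default is never used
def pvSplitColonA (s : String) : List String := (PySem.Str.split? s ":").getD []

-- {k: v for k, v in temp_list} rendered as its items list (insertion order, overwrite in place)
def pvDictA (temp : List (String × String)) : List (String × String) :=
  (temp.foldl (fun d p => d.insert p.1 p.2) (PySem.Dict.empty : PySem.Dict String String)).items

-- the for-loop of _format_stdout, state = (curr_line, temp_list, ret_list)
def pvALoop (lastLine : Int) : Int → List (String × String) →
    List (List (List (String × String))) → List String → List (List (List (String × String)))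
  | _, _, ret, [] => ret
  | currLine, temp, ret, line :: rest =>
      let curr := currLine + 1
      let item := PySem.Str.strip line
      -- tmp_list[0] / tmp_list[1]: under the guard ':' ∈ item the split has ≥ 2 pieces, defaults unused
      let temp' := if decide (0 < PySem.Str.len item) && PySem.Str.isIn ":" item then
          temp ++ [(PySem.List.pyGetD (pvSplitColonA item) 0 "",
                    PySem.Str.strip (PySem.List.pyGetD (pvSplitColonA item) 1 ""))]
        else temp
      if (!(PySem.Str.isIn ":" item) && decide (0 < temp'.length))
          || (PySem.Str.isIn ":" item && decide (curr = lastLine)) then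
        pvALoop lastLine curr [] (ret ++ [[pvDictA temp']]) rest
      else
        pvALoop lastLine curr temp' ret rest

def format_stdout_py (stdout : String) : List (List (List (String × String))) :=
  let formatted := PySem.Str.strip (PySem.Str.replace (PySem.Str.replace stdout "-" "") "," "")
  let lines := (PySem.Str.split? formatted "\n").getD []   -- '\n' ≠ "", default unused
  pvALoop (PySem.List.len lines) 0 [] [] lines

-- ===== PORT B =====

-- pass 1: gids — each line's run id = current count of non-colon lines seen so far
def pvGids : Int → List String → List Int
  | _, [] => []
  | g, l :: ls =>
      let g' := if PySem.Str.isIn ":" l then g else g + 1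
      g' :: pvGids g' ls

-- pass 2 body: buckets.setdefault(gid, {})[parts[0]] = parts[1].strip()
def pvStepB (b : PySem.Dict Int (PySem.Dict String String)) (p : Int × String) :
    PySem.Dict Int (PySem.Dict String String) :=
  if PySem.Str.isIn ":" p.2 then
    let parts := (PySem.Str.split? p.2 ":").getD []   -- ':' ≠ "", default unused
    b.insert p.1 (((b.get? p.1).getD PySem.Dict.empty).insert
      (PySem.List.pyGetD parts 0 "") (PySem.Str.strip (PySem.List.pyGetD parts 1 "")))
  else b

def format_stdout_py_alt (stdout : String) : List (List (List (String × String))) :=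
  let stripped := ((PySem.Str.split? (PySem.Str.strip
      (PySem.Str.replace (PySem.Str.replace stdout "-" "") "," "")) "\n").getD []).map PySem.Str.strip
  let buckets := ((pvGids 0 stripped).zip stripped).foldl pvStepB
      (PySem.Dict.empty : PySem.Dict Int (PySem.Dict String String))
  buckets.values.map (fun d => [d.items])

-- ===== PRECONDITION & SPEC =====
def Spec_format_stdout_py (stdout : String) (out : List (List (List (String × String)))) : Prop := out = format_stdout_py_alt stdout
instance (stdout : String) (out : List (List (List (String × String)))) : Decidable (Spec_format_stdout_py stdout out) := by unfold Spec_format_stdout_py; infer_instance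

-- ===== CLAIM (what is proved, stated in full; the proofs are below) =====
def Claim_equal_format_stdout_py : Prop := ∀ (stdout : String), Dom_format_stdout_py stdout → Spec_format_stdout_py stdout (format_stdout_py stdout)

-- ===== LEMMAS AND PROOFS =====

-- line predicates and the key/value extraction shared by the characterisations
def pvHasColon (s : String) : Bool := PySem.Str.isIn ":" s

def pvKey (s : String) : String := PySem.List.pyGetD ((PySem.Str.split? s ":").getD []) 0 ""
def pvVal (s : String) : String :=
  PySem.Str.strip (PySem.List.pyGetD ((PySem.Str.split? s ":").getD []) 1 "")

-- run-wise reference form: one dict per maximal run of colon-lines (lines already stripped)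
def pvFoldD (d : PySem.Dict String String) (run : List String) : PySem.Dict String String :=
  run.foldl (fun d s => d.insert (pvKey s) (pvVal s)) d

def pvRunDict (run : List String) : List (String × String) := (pvFoldD PySem.Dict.empty run).items

def pvBLoop : List String → List (List (List (String × String)))
  | [] => []
  | l :: ls =>
      if h : pvHasColon l = true then
        [pvRunDict ((l :: ls).takeWhile pvHasColon)] :: pvBLoop ((l :: ls).dropWhile pvHasColon)
      else
        pvBLoop ls
termination_by lines => lines.length
decreasing_by
  · simpa [List.dropWhile_cons, h] using Nat.lt_succ_of_le (List.length_dropWhile_le pvHasColon ls)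
  · simp

def pvRunsD : List String → List (PySem.Dict String String)
  | [] => []
  | l :: ls =>
      if h : pvHasColon l = true then
        pvFoldD PySem.Dict.empty ((l :: ls).takeWhile pvHasColon) :: pvRunsD ((l :: ls).dropWhile pvHasColon)
      else
        pvRunsD ls
termination_by lines => lines.length
decreasing_by
  · simpa [List.dropWhile_cons, h] using Nat.lt_succ_of_le (List.length_dropWhile_le pvHasColon ls)
  · simp

-- === A-side characterisation (A's counter loop = the run-wise form) ===

-- A's per-line colon test on the stripped line (the `len(item) > 0 and ":" in item` guard)
def pvC (l : String) : Bool :=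
  decide (0 < PySem.Str.len (PySem.Str.strip l)) && PySem.Str.isIn ":" (PySem.Str.strip l)

-- A's key/value pair for a colon line
def pvPair (l : String) : String × String :=
  (PySem.List.pyGetD (pvSplitColonA (PySem.Str.strip l)) 0 "",
   PySem.Str.strip (PySem.List.pyGetD (pvSplitColonA (PySem.Str.strip l)) 1 ""))

-- counter-free version of A's loop (flush-at-last-line becomes flush-at-empty-rest)
def pvFA : List (String × String) → List String → List (List (List (String × String)))
  | _, [] => []
  | temp, l :: rest =>
      let temp' := if pvC l then temp ++ [pvPair l] else temp
      if (!pvC l && decide (0 < temp'.length)) || (pvC l && rest.isEmpty) then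
        [pvDictA temp'] :: pvFA [] rest
      else
        pvFA temp' rest

-- run-structured characterisation of pvFA (= the run-wise form, seeded with a pending temp)
def pvRunFrom (temp : List (String × String)) (run : List String) : List (String × String) :=
  (run.foldl (fun d l => d.insert (pvPair l).1 (pvPair l).2)
    (temp.foldl (fun d p => d.insert p.1 p.2) (PySem.Dict.empty : PySem.Dict String String))).items

def pvRhs (temp : List (String × String)) : List String → List (List (List (String × String)))
  | [] => []
  | l :: ls =>
      if pvC l then
        [pvRunFrom temp ((l :: ls).takeWhile pvC)] :: pvBLoop (((l :: ls).dropWhile pvC).map PySem.Str.strip)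
      else if temp.isEmpty then pvBLoop ((l :: ls).map PySem.Str.strip)
      else [pvDictA temp] :: pvBLoop ((l :: ls).map PySem.Str.strip)

theorem pv_colon_len (s : String) :
    (decide (0 < PySem.Str.len s) && PySem.Str.isIn ":" s) = PySem.Str.isIn ":" s := by
  cases h : PySem.Str.isIn ":" s with
  | false => simp
  | true =>
    have hin := (PySem.Str.isIn_iff_infix ":" s).mp h
    have hne : s.toList ≠ [] := by
      intro he
      rw [he] at hin
      simp at hin
    have hpos : 0 < s.toList.length := List.length_pos_iff.mpr hne
    simp [PySem.Str.len_eq]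
    simpa using hpos

theorem pvC_eq_isIn (l : String) : pvC l = PySem.Str.isIn ":" (PySem.Str.strip l) := by
  unfold pvC
  exact pv_colon_len _

theorem pvHasColon_strip (l : String) : pvHasColon (PySem.Str.strip l) = pvC l := by
  unfold pvHasColon
  exact (pvC_eq_isIn l).symm

theorem pvRunFrom_eq (temp : List (String × String)) (run : List String) :
    pvRunFrom temp run = pvDictA (temp ++ run.map pvPair) := by
  simp [pvRunFrom, pvDictA, List.foldl_append, List.foldl_map]

theorem pvBLoop_cons_neg (l : String) (ls : List String) (h : pvHasColon l = false) :
    pvBLoop (l :: ls) = pvBLoop ls := by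
  rw [pvBLoop]
  simp [h]

theorem pvBLoop_cons_pos (l : String) (ls : List String) (h : pvHasColon l = true) :
    pvBLoop (l :: ls) =
      [pvRunDict ((l :: ls).takeWhile pvHasColon)] :: pvBLoop ((l :: ls).dropWhile pvHasColon) := by
  rw [pvBLoop]
  simp [h]

theorem pvRunDict_map (run : List String) :
    pvRunDict (run.map PySem.Str.strip) = pvRunFrom [] run := by
  simp [pvRunDict, pvFoldD, pvRunFrom, List.foldl_map, pvPair, pvKey, pvVal, pvSplitColonA]

theorem pvComp_strip : pvHasColon ∘ PySem.Str.strip = pvC := by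
  funext l
  simp [Function.comp, pvHasColon_strip]

theorem pvALoop_eq_pvFA (lines : List String) : ∀ (curr : Int) temp ret,
    pvALoop (curr + lines.length) curr temp ret lines = ret ++ pvFA temp lines := by
  induction lines with
  | nil =>
    intro curr temp ret
    simp [pvALoop, pvFA]
  | cons l rest ih =>
    intro curr temp ret
    have e2 : PySem.Str.isIn ":" (PySem.Str.strip l) = pvC l := (pvC_eq_isIn l).symm
    have hlast : (curr + ((l :: rest).length : Nat) : Int) = (curr + 1) + rest.length := by
      simp only [List.length_cons]
      push_cast
      omega
    have hdec : decide ((curr + 1 : Int) = (curr + 1) + rest.length) = rest.isEmpty := by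
      rcases rest with _ | ⟨r, rs⟩
      · simp
      · simp only [List.isEmpty_cons, List.length_cons]
        apply decide_eq_false
        push_cast
        omega
    have hguard : (decide (0 < PySem.Str.len (PySem.Str.strip l))
        && PySem.Str.isIn ":" (PySem.Str.strip l)) = pvC l := rfl
    have hpair : (PySem.List.pyGetD (pvSplitColonA (PySem.Str.strip l)) 0 "",
        PySem.Str.strip (PySem.List.pyGetD (pvSplitColonA (PySem.Str.strip l)) 1 "")) = pvPair l := rfl
    rw [hlast]
    simp only [pvALoop, pvFA]
    simp only [hguard, hpair]
    simp only [e2, hdec]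
    rw [ih, ih]
    split <;> · split <;> simp [List.append_assoc]

theorem pvRunFrom_snoc (temp : List (String × String)) (l : String) (run : List String) :
    pvRunFrom (temp ++ [pvPair l]) run = pvRunFrom temp (l :: run) := by
  simp [pvRunFrom_eq]

theorem pvBLoop_map_strip (lines : List String) :
    pvBLoop (lines.map PySem.Str.strip) = pvRhs [] lines := by
  rcases lines with _ | ⟨l, ls⟩
  · simp [pvBLoop, pvRhs]
  · by_cases hc : pvC l = true
    · have h1 : pvHasColon (PySem.Str.strip l) = true := by rw [pvHasColon_strip]; exact hc
      rw [List.map_cons, pvBLoop_cons_pos _ _ h1, ← List.map_cons]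
      rw [List.takeWhile_map, List.dropWhile_map, pvComp_strip, pvRunDict_map]
      simp [pvRhs, hc]
    · simp [pvRhs, hc]

theorem pvFA_eq_pvRhs (lines : List String) : ∀ temp, pvFA temp lines = pvRhs temp lines := by
  induction lines with
  | nil => intro temp; rfl
  | cons l ls ih =>
    intro temp
    by_cases hc : pvC l = true
    · rcases ls with _ | ⟨l', ls'⟩
      · simp [pvFA, pvRhs, hc, pvRunFrom_eq, pvBLoop]
      · have hstep : pvFA temp (l :: l' :: ls') = pvFA (temp ++ [pvPair l]) (l' :: ls') := by
          simp [pvFA, hc]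
        rw [hstep, ih]
        by_cases hc' : pvC l' = true
        · simp [pvRhs, hc, hc', pvRunFrom_snoc]
        · simp [pvRhs, hc, hc', pvRunFrom_eq]
    · have h1 : pvHasColon (PySem.Str.strip l) = false := by
        rw [pvHasColon_strip]
        exact Bool.eq_false_iff.mpr hc
      by_cases ht : temp = []
      · subst ht
        have hstep : pvFA ([] : List (String × String)) (l :: ls) = pvFA [] ls := by
          simp [pvFA, hc]
        rw [hstep, ih, ← pvBLoop_map_strip, ← pvBLoop_map_strip, List.map_cons,
          pvBLoop_cons_neg _ _ h1]
      · have hstep : pvFA temp (l :: ls) = [pvDictA temp] :: pvFA [] ls := by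
          simp [pvFA, hc, List.length_pos_iff, ht]
        rw [hstep, ih, ← pvBLoop_map_strip]
        simp [pvRhs, hc, List.isEmpty_iff, ht, List.map_cons, pvBLoop_cons_neg _ _ h1]

-- === B-side characterisation (the staged gid pipeline = the run-wise form) ===

-- fused form of B's two passes: carry the running gid instead of the gids list
def pvBF : Int → PySem.Dict Int (PySem.Dict String String) → List String →
    PySem.Dict Int (PySem.Dict String String)
  | _, b, [] => b
  | g, b, l :: ls =>
      if pvHasColon l then
        pvBF g (b.insert g (((b.get? g).getD PySem.Dict.empty).insert (pvKey l) (pvVal l))) ls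
      else pvBF (g + 1) b ls

theorem pvZip_eq_pvBF (lines : List String) : ∀ g b,
    ((pvGids g lines).zip lines).foldl pvStepB b = pvBF g b lines := by
  induction lines with
  | nil => intro g b; rfl
  | cons l ls ih =>
    intro g b
    by_cases hc : PySem.Chars.isIn [':'] l.toList = true
    · simp [pvGids, pvStepB, pvBF, pvKey, pvVal, pvHasColon, hc, ih]
    · simp [pvGids, pvStepB, pvBF, pvHasColon, hc, ih]

theorem pvValues_insert_fresh (b : PySem.Dict Int (PySem.Dict String String)) (g : Int)
    (d : PySem.Dict String String) (h : b.contains g = false) :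
    (b.insert g d).values = b.values ++ [d] := by
  simp [PySem.Dict.values, PySem.Dict.items_insert_of_not_contains, h]

theorem pvContains_of_lt (b : PySem.Dict Int (PySem.Dict String String)) (g : Int)
    (hb : ∀ k ∈ b.keys, k < g) : b.contains g = false := by
  rw [PySem.Dict.contains_eq_decide_mem_keys]
  simp only [decide_eq_false_iff_not]
  intro hmem
  exact absurd (hb g hmem) (lt_irrefl g)

-- the joint loop invariant for pvBF: main form (no open run) and mid form (run open at key g)
theorem pvBF_both : ∀ n : Nat,
    (∀ lines : List String, lines.length ≤ n → ∀ (g : Int) b, (∀ k ∈ PySem.Dict.keys b, k < g) →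
       (pvBF g b lines).values = b.values ++ pvRunsD lines)
  ∧ (∀ ls : List String, ls.length ≤ n → ∀ (g : Int) b d, (∀ k ∈ PySem.Dict.keys b, k < g) →
       (pvBF g (b.insert g d) ls).values
         = b.values ++ pvFoldD d (ls.takeWhile pvHasColon) :: pvRunsD (ls.dropWhile pvHasColon)) := by
  intro n
  induction n with
  | zero =>
    constructor
    · intro lines hlen g b hb
      rw [List.length_eq_zero_iff.mp (Nat.le_zero.mp hlen)]
      simp [pvBF, pvRunsD]
    · intro ls hlen g b d hb
      rw [List.length_eq_zero_iff.mp (Nat.le_zero.mp hlen)]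
      simp [pvBF, pvRunsD, pvFoldD,
        pvValues_insert_fresh b g d (pvContains_of_lt b g hb)]
  | succ n ih =>
    constructor
    · intro lines hlen g b hb
      rcases lines with _ | ⟨l, ls⟩
      · simp [pvBF, pvRunsD]
      · have hls : ls.length ≤ n := by simpa using Nat.lt_succ_iff.mp (Nat.lt_of_lt_of_le (by simp) hlen)
        by_cases hc : pvHasColon l = true
        · have hget : b.get? g = none := by
            rw [PySem.Dict.get?_eq_none_iff_not_mem_keys]
            intro hmem
            exact absurd (hb g hmem) (lt_irrefl g)
          rw [pvBF, if_pos hc, hget]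
          rw [ih.2 ls hls g b _ hb]
          rw [pvRunsD, dif_pos hc]
          simp [hc, pvFoldD]
        · have hc' : pvHasColon l = false := Bool.eq_false_iff.mpr hc
          rw [pvBF, if_neg hc]
          rw [ih.1 ls hls (g + 1) b (fun k hk => lt_trans (hb k hk) (by omega))]
          rw [pvRunsD, dif_neg hc]
    · intro ls hlen g b d hb
      rcases ls with _ | ⟨l, ls'⟩
      · simp [pvBF, pvFoldD,
          pvValues_insert_fresh b g d (pvContains_of_lt b g hb), pvRunsD]
      · have hls : ls'.length ≤ n := by simpa using Nat.lt_succ_iff.mp (Nat.lt_of_lt_of_le (by simp) hlen)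
        by_cases hc : pvHasColon l = true
        · rw [pvBF, if_pos hc, PySem.Dict.get?_insert_self, Option.getD_some,
            PySem.Dict.insert_insert_self]
          rw [ih.2 ls' hls g b (d.insert (pvKey l) (pvVal l)) hb]
          simp [hc, pvFoldD]
        · have hkeys : ∀ k ∈ PySem.Dict.keys (b.insert g d), k < g + 1 := by
            intro k hk
            rcases (PySem.Dict.mem_keys_insert _ _ _ _).mp hk with h | h
            · omega
            · exact lt_trans (hb k h) (by omega)
          rw [pvBF, if_neg hc]
          rw [ih.1 ls' hls (g + 1) (b.insert g d) hkeys]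
          rw [pvValues_insert_fresh b g d (pvContains_of_lt b g hb)]
          have hc' : pvHasColon l = false := Bool.eq_false_iff.mpr hc
          rw [List.takeWhile_cons, List.dropWhile_cons]
          simp only [hc', Bool.false_eq_true, if_false, pvFoldD, List.foldl_nil]
          rw [pvRunsD, dif_neg hc]
          simp

theorem pvBLoop_eq_runsD : ∀ n (lines : List String), lines.length ≤ n →
    pvBLoop lines = (pvRunsD lines).map (fun d => [d.items]) := by
  intro n
  induction n with
  | zero =>
    intro lines hlen
    rw [List.length_eq_zero_iff.mp (Nat.le_zero.mp hlen)]
    simp [pvBLoop, pvRunsD]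
  | succ n ih =>
    intro lines hlen
    rcases lines with _ | ⟨l, ls⟩
    · simp [pvBLoop, pvRunsD]
    · by_cases hc : pvHasColon l = true
      · rw [pvBLoop_cons_pos _ _ hc, pvRunsD, dif_pos hc, List.map_cons]
        congr 1
        apply ih
        have := List.length_dropWhile_le pvHasColon ls
        simp only [List.dropWhile_cons, hc, if_pos]
        simp only [List.length_cons] at hlen
        omega
      · rw [pvBLoop_cons_neg _ _ (Bool.eq_false_iff.mpr hc), pvRunsD,
          dif_neg hc]
        apply ih
        simp only [List.length_cons] at hlen
        omega

theorem pvAlt_eq_pvBLoop (lines : List String) :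
    (((pvGids 0 lines).zip lines).foldl pvStepB
        (PySem.Dict.empty : PySem.Dict Int (PySem.Dict String String))).values.map
      (fun d => [d.items]) = pvBLoop lines := by
  rw [pvZip_eq_pvBF]
  rw [(pvBF_both lines.length).1 lines (le_refl _) 0 PySem.Dict.empty (by simp)]
  rw [pvBLoop_eq_runsD lines.length lines (le_refl _)]
  simp [PySem.Dict.empty]

-- ===== VERDICT (by name: the statement is the Claim_ definition above) =====
theorem format_stdout_py_spec : Claim_equal_format_stdout_py := by
  intro stdout _
  unfold Spec_format_stdout_py format_stdout_py format_stdout_py_alt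
  simp only [PySem.List.len_eq]
  rw [pvAlt_eq_pvBLoop]
  generalize ((PySem.Str.split? (PySem.Str.strip
      (PySem.Str.replace (PySem.Str.replace stdout "-" "") "," "")) "\n").getD []) = lines
  have h0 : ((lines.length : Int)) = 0 + (lines.length : Int) := by ring
  rw [h0, pvALoop_eq_pvFA, pvFA_eq_pvRhs, ← pvBLoop_map_strip]
  simp
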